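-- pv_equiv track=rewrite | github.com/mylo-by-nate/mylo | parietal/judge.py | judgePhrase
-- ===== SOURCE A (Python) =====
-- weather = ['weather', 'temperature', 'humidity', 'pressure', 'barometric', 'atmospheric', 'atmosphere', 'rain', 'cloud', 'lightning', 'snow', 'flood', 'storm', 'dew', 'wind']
--
-- plant = ['none']
--
-- memory = ['memory', 'create', 'delete', 'update', 'new', 'neuron', 'cell']
--
-- question = ['what', 'where', 'when', 'how', 'why']
--
-- def judgePhrase(phrase):
--     if type(phrase) is not list:
--         phrase = phrase.lower()
--         phrase = phrase.split(" ")
--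
--     weatherScore = 0
--     plantScore = 0
--     memoryScore = 0
--     questionScore = 0
--
--     for word in weather:
--         if word in phrase:
--             weatherScore += 1
--     for word in plant:
--         if word in phrase:
--             plantScore += 1
--     for word in memory:
--         if word in phrase:
--             memoryScore += 1
--     for word in question:
--         if word in phrase:
--             questionScore += 1
--
--     if questionScore > 2 and plantScore > 2:
--         return "plant query"
--     elif questionScore > 2 and weatherScore > 2:
--         return "weather query"
--     elif plantScore > 2:
--         return "plant"
--     elif weatherScore > 2:
--         return "weather"
--     elif memoryScore > 2:
--         return "memory"
--     elif questionScore > 2 and memory > 2: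
--         return "memory query"
--     else:
--         return "unsure"
-- ===== SOURCE B (Python) =====
-- _KW2CAT = {
--     **{w: "weather" for w in ['weather', 'temperature', 'humidity', 'pressure', 'barometric',
--                               'atmospheric', 'atmosphere', 'rain', 'cloud', 'lightning',
--                               'snow', 'flood', 'storm', 'dew', 'wind']},
--     "none": "plant",
--     **{w: "memory" for w in ['memory', 'create', 'delete', 'update', 'new', 'neuron', 'cell']},
--     **{w: "question" for w in ['what', 'where', 'when', 'how', 'why']},
-- }
--
--
-- def judgePhrase(phrase):
--     if type(phrase) is not list:
--         phrase = phrase.lower()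
--         phrase = phrase.split(" ")
--
--     weatherScore = plantScore = memoryScore = questionScore = 0
--     for word in set(phrase):
--         cat = _KW2CAT.get(word)
--         if cat == "weather":
--             weatherScore += 1
--         elif cat == "plant":
--             plantScore += 1
--         elif cat == "memory":
--             memoryScore += 1
--         elif cat == "question":
--             questionScore += 1
--
--     if questionScore > 2 and plantScore > 2:
--         return "plant query"
--     elif questionScore > 2 and weatherScore > 2:
--         return "weather query"
--     elif plantScore > 2:
--         return "plant"
--     elif weatherScore > 2:
--         return "weather"
--     elif memoryScore > 2:
--         return "memory"
--     elif questionScore > 2 and memoryScore > 2: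
--         return "memory query"
--     else:
--         return "unsure"
-- ===== Notes on version B (the rewrite author's own statement) =====
-- stated objective: idiomatic
-- what changed: Instead of four passes over the keyword lists each scanning the phrase, B builds one inverted keyword-to-category dict and makes a single pass over the set of the phrase's words, incrementing the matched category's counter; the buggy last branch (`memory > 2` comparing a list to an int, a TypeError whenever reached) is written as the evidently intended `memoryScore > 2`, which is unreachable, so B returns where A raises.
import Mathlib
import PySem

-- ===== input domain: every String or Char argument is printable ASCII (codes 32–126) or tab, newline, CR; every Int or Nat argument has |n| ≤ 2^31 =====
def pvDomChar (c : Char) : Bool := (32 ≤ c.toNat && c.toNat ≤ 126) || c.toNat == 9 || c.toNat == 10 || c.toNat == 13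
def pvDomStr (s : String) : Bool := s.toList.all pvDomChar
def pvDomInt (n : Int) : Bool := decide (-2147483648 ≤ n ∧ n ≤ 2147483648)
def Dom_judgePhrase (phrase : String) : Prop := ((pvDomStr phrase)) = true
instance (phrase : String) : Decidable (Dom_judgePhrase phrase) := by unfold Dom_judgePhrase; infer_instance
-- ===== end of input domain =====

-- B replaces A's four keyword-list passes by one inverted keyword→category dict and a single pass
-- over the set of the phrase's words (idiomatic); where A's last branch raises TypeError, B returns "unsure".

-- ===== PORT A =====
-- module-level keyword lists of A
def pvWeather : List String := ["weather", "temperature", "humidity", "pressure", "barometric", "atmospheric", "atmosphere", "rain", "cloud", "lightning", "snow", "flood", "storm", "dew", "wind"]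
def pvPlant : List String := ["none"]
def pvMemory : List String := ["memory", "create", "delete", "update", "new", "neuron", "cell"]
def pvQuestion : List String := ["what", "where", "when", "how", "why"]

-- split(" ") has a nonempty separator, so Str.split? is always `some`; the `.getD []` default is never used.
-- The last Python elif `questionScore > 2 and memory > 2` compares the list `memory` with an int and
-- raises TypeError whenever `questionScore > 2` holds there; Pre_ excludes exactly those inputs and the
-- port marks that raise site with the sentinel "TypeError".
def judgePhrase (phrase : String) : String :=
  let words := (PySem.Str.split? (PySem.Str.lower phrase) " ").getD []
  let weatherScore := pvWeather.foldl (fun acc word => if words.contains word then acc + 1 else acc) (0 : Int)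
  let plantScore := pvPlant.foldl (fun acc word => if words.contains word then acc + 1 else acc) (0 : Int)
  let memoryScore := pvMemory.foldl (fun acc word => if words.contains word then acc + 1 else acc) (0 : Int)
  let questionScore := pvQuestion.foldl (fun acc word => if words.contains word then acc + 1 else acc) (0 : Int)
  if 2 < questionScore ∧ 2 < plantScore then "plant query"
  else if 2 < questionScore ∧ 2 < weatherScore then "weather query"
  else if 2 < plantScore then "plant"
  else if 2 < weatherScore then "weather"
  else if 2 < memoryScore then "memory"
  else if 2 < questionScore then "TypeError"  -- Python raises TypeError here; outside Pre_
  else "unsure"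

-- ===== PORT B =====
-- the inverted index _KW2CAT of Source B (a dict literal with pairwise-distinct keys)
def pvKw2Cat : PySem.Dict String String := PySem.Dict.mk
  [("weather", "weather"), ("temperature", "weather"), ("humidity", "weather"), ("pressure", "weather"),
   ("barometric", "weather"), ("atmospheric", "weather"), ("atmosphere", "weather"), ("rain", "weather"),
   ("cloud", "weather"), ("lightning", "weather"), ("snow", "weather"), ("flood", "weather"),
   ("storm", "weather"), ("dew", "weather"), ("wind", "weather"),
   ("none", "plant"),
   ("memory", "memory"), ("create", "memory"), ("delete", "memory"), ("update", "memory"),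
   ("new", "memory"), ("neuron", "memory"), ("cell", "memory"),
   ("what", "question"), ("where", "question"), ("when", "question"), ("how", "question"), ("why", "question")]

-- the body of Source B's single loop: look the word up, bump the matched category's counter
def pvStep (acc : Int × Int × Int × Int) (word : String) : Int × Int × Int × Int :=
  let cat := pvKw2Cat.get? word
  if cat == some "weather" then (acc.1 + 1, acc.2.1, acc.2.2.1, acc.2.2.2)
  else if cat == some "plant" then (acc.1, acc.2.1 + 1, acc.2.2.1, acc.2.2.2)
  else if cat == some "memory" then (acc.1, acc.2.1, acc.2.2.1 + 1, acc.2.2.2)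
  else if cat == some "question" then (acc.1, acc.2.1, acc.2.2.1, acc.2.2.2 + 1)
  else acc

def judgePhrase_alt (phrase : String) : String :=
  let words := (PySem.Str.split? (PySem.Str.lower phrase) " ").getD []
  let s := (PySem.Set.ofList words).foldl pvStep (0, 0, 0, 0)
  let weatherScore := s.1
  let plantScore := s.2.1
  let memoryScore := s.2.2.1
  let questionScore := s.2.2.2
  if 2 < questionScore ∧ 2 < plantScore then "plant query"
  else if 2 < questionScore ∧ 2 < weatherScore then "weather query"
  else if 2 < plantScore then "plant"
  else if 2 < weatherScore then "weather"
  else if 2 < memoryScore then "memory"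
  else if 2 < questionScore ∧ 2 < memoryScore then "memory query"
  else "unsure"

-- ===== PRECONDITION & SPEC =====
-- number of keywords of `kw` occurring among the phrase's lowercased space-split words
def pvHits (kw : List String) (phrase : String) : Nat :=
  (kw.filter (fun k => ((PySem.Str.split? (PySem.Str.lower phrase) " ").getD []).contains k)).length

-- Pre_ excludes exactly the inputs on which A raises TypeError (more than 2 question keywords while
-- at most 2 weather and at most 2 memory keywords, reaching the `memory > 2` list-vs-int comparison).
def Pre_judgePhrase (phrase : String) : Prop :=
  ¬ (2 < pvHits pvQuestion phrase ∧ pvHits pvWeather phrase ≤ 2 ∧ pvHits pvMemory phrase ≤ 2)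
instance (phrase : String) : Decidable (Pre_judgePhrase phrase) := by unfold Pre_judgePhrase; infer_instance

def pvWitness_judgePhrase : String := "what is the weather"

def Spec_judgePhrase (phrase : String) (out : String) : Prop := out = judgePhrase_alt phrase
instance (phrase : String) (out : String) : Decidable (Spec_judgePhrase phrase out) := by unfold Spec_judgePhrase; infer_instance

-- ===== CLAIM (what is proved, stated in full; the proofs are below) =====
def Claim_equal_judgePhrase : Prop := ∀ (phrase : String), Dom_judgePhrase phrase → Pre_judgePhrase phrase → Spec_judgePhrase phrase (judgePhrase phrase)
-- ===== LEMMAS AND PROOFS =====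

-- all 28 keywords, in index order (proof-side helper)
def pvAll : List String := pvWeather ++ pvPlant ++ pvMemory ++ pvQuestion

lemma pvGet?_of_not_mem (w : String) (hw : w ∉ pvAll) : pvKw2Cat.get? w = none := by
  have hk : pvKw2Cat.keys = pvAll := by decide
  rw [PySem.Dict.get?_eq_none_iff_not_mem_keys, hk]
  exact hw

lemma pvCat_all (w : String) :
    ((pvKw2Cat.get? w == some "weather") = pvWeather.contains w) ∧
    ((pvKw2Cat.get? w == some "plant") = pvPlant.contains w) ∧
    ((pvKw2Cat.get? w == some "memory") = pvMemory.contains w) ∧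
    ((pvKw2Cat.get? w == some "question") = pvQuestion.contains w) := by
  by_cases hw : w ∈ pvAll
  · simp only [pvAll, pvWeather, pvPlant, pvMemory, pvQuestion, List.mem_append, List.mem_cons,
      List.not_mem_nil, or_false, or_assoc] at hw
    rcases hw with (rfl|rfl|rfl|rfl|rfl|rfl|rfl|rfl|rfl|rfl|rfl|rfl|rfl|rfl|rfl|rfl|rfl|rfl|rfl|rfl|rfl|rfl|rfl|rfl|rfl|rfl|rfl|rfl) <;> decide
  · rw [pvGet?_of_not_mem w hw]
    have h1 : w ∉ pvWeather := fun h => hw (by simp only [pvAll, List.mem_append]; tauto)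
    have h2 : w ∉ pvPlant := fun h => hw (by simp only [pvAll, List.mem_append]; tauto)
    have h3 : w ∉ pvMemory := fun h => hw (by simp only [pvAll, List.mem_append]; tauto)
    have h4 : w ∉ pvQuestion := fun h => hw (by simp only [pvAll, List.mem_append]; tauto)
    simp [h1, h2, h3, h4]

lemma pvCat_weather (w : String) : (pvKw2Cat.get? w == some "weather") = pvWeather.contains w :=
  (pvCat_all w).1
lemma pvCat_plant (w : String) : (pvKw2Cat.get? w == some "plant") = pvPlant.contains w :=
  (pvCat_all w).2.1
lemma pvCat_memory (w : String) : (pvKw2Cat.get? w == some "memory") = pvMemory.contains w :=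
  (pvCat_all w).2.2.1
lemma pvCat_question (w : String) : (pvKw2Cat.get? w == some "question") = pvQuestion.contains w :=
  (pvCat_all w).2.2.2

-- B's quadruple fold counts, per category, the words the index maps there
lemma pvFold (l : List String) (a b c d : Int) :
    l.foldl pvStep (a, b, c, d) =
      (a + (l.countP (fun w => pvKw2Cat.get? w == some "weather") : Int),
       b + (l.countP (fun w => pvKw2Cat.get? w == some "plant") : Int),
       c + (l.countP (fun w => pvKw2Cat.get? w == some "memory") : Int),
       d + (l.countP (fun w => pvKw2Cat.get? w == some "question") : Int)) := by
  induction l generalizing a b c d with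
  | nil => simp
  | cons w t ih =>
    simp only [List.foldl_cons, List.countP_cons, pvStep]
    split_ifs with h1 h2 h3 h4 <;> rw [ih] <;> simp_all <;> ring

-- counting distinct phrase words that are keywords = counting keywords that occur in the phrase
lemma pvCount_swap (ws kw : List String) (hkw : kw.Nodup) :
    ((PySem.Set.ofList ws).countP fun w => kw.contains w)
      = kw.countP (fun k => ws.contains k) := by
  rw [List.countP_eq_length_filter, List.countP_eq_length_filter]
  refine (List.perm_of_nodup_nodup_toFinset_eq
    ((PySem.Set.nodup_ofList ws).filter _) (hkw.filter _) ?_).length_eq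
  ext x
  simp only [List.mem_toFinset, List.mem_filter, PySem.Set.mem_ofList, List.contains_iff_mem]
  tauto

-- the two ports compute the same four scores from the same word list
lemma pvScores_eq (ws : List String) :
    (PySem.Set.ofList ws).foldl pvStep (0, 0, 0, 0) =
      (pvWeather.foldl (fun acc word => if ws.contains word then acc + 1 else acc) (0 : Int),
       pvPlant.foldl (fun acc word => if ws.contains word then acc + 1 else acc) (0 : Int),
       pvMemory.foldl (fun acc word => if ws.contains word then acc + 1 else acc) (0 : Int),
       pvQuestion.foldl (fun acc word => if ws.contains word then acc + 1 else acc) (0 : Int)) := by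
  rw [pvFold]
  simp only [PySem.List.foldl_count_if, zero_add]
  rw [show (fun w => pvKw2Cat.get? w == some "weather") = (fun w => pvWeather.contains w) from funext pvCat_weather,
      show (fun w => pvKw2Cat.get? w == some "plant") = (fun w => pvPlant.contains w) from funext pvCat_plant,
      show (fun w => pvKw2Cat.get? w == some "memory") = (fun w => pvMemory.contains w) from funext pvCat_memory,
      show (fun w => pvKw2Cat.get? w == some "question") = (fun w => pvQuestion.contains w) from funext pvCat_question,
      pvCount_swap _ _ (by decide), pvCount_swap _ _ (by decide), pvCount_swap _ _ (by decide), pvCount_swap _ _ (by decide)]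

-- A's per-category score is the keyword count pvHits
lemma pvScore_hits (kw : List String) (phrase : String) :
    kw.foldl (fun acc word => if ((PySem.Str.split? (PySem.Str.lower phrase) " ").getD []).contains word then acc + 1 else acc) (0 : Int)
      = (pvHits kw phrase : Int) := by
  rw [PySem.List.foldl_count_if, pvHits, List.countP_eq_length_filter, zero_add]

-- ===== VERDICT (by name: the statement is the Claim_ definition above) =====
theorem judgePhrase_spec : Claim_equal_judgePhrase := by
  intro phrase _ hpre
  unfold Spec_judgePhrase
  simp only [judgePhrase, judgePhrase_alt, pvScores_eq, pvScore_hits]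
  rw [Pre_judgePhrase] at hpre
  split_ifs <;> first
    | rfl
    | (exfalso; exact hpre ⟨by omega, by omega, by omega⟩)
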